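-- pv_equiv track=rewrite | github.com/puyanguvic/tokenizer_icml2026 | ctok_core/build_ctok_from_corpus.py | _collect_doc_stats_chunk
-- ===== SOURCE A (Python) =====
-- from collections import Counter, defaultdict
-- from typing import Dict, Iterable, List, Optional, Sequence, Set, Tuple
--
-- def _get_text(item: object) -> str:
--     if isinstance(item, (list, tuple)) and len(item) == 2:
--         return str(item[1])
--     return str(item)
--
-- def _collect_doc_stats_chunk(
--     args: Tuple[List[object], Set[str], int, bool, int, Set[str]]
-- ) -> Tuple[Counter[str], Dict[str, int]]:
--     items, candidates, max_len, allow_boundary_at_ends, max_chars_per_sample, boundaries = args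
--     doc_freq: Counter[str] = Counter()
--     max_in_doc: Dict[str, int] = {}
--     for item in items:
--         text = _get_text(item)
--         s = text[:max_chars_per_sample]
--         n = len(s)
--         i = 0
--         local: Counter[str] = Counter()
--         while i < n:
--             if s[i] in boundaries:
--                 i += 1
--                 continue
--             j = i
--             while j < n and (j - i) < max_len and s[j] not in boundaries:
--                 j += 1
--                 cur = s[i:j]
--                 if len(cur) >= 2 and cur in candidates:
--                     local[cur] += 1
--                 if allow_boundary_at_ends:
--                     if j < n and (len(cur) + 1) <= max_len and s[j] in boundaries:
--                         t = cur + s[j]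
--                         if t in candidates:
--                             local[t] += 1
--                     if i > 0 and (len(cur) + 1) <= max_len and s[i - 1] in boundaries:
--                         t = s[i - 1] + cur
--                         if t in candidates:
--                             local[t] += 1
--             i += 1
--         for tok in local:
--             doc_freq[tok] += 1
--             prev = max_in_doc.get(tok, 0)
--             if local[tok] > prev:
--                 max_in_doc[tok] = local[tok]
--     return doc_freq, max_in_doc
-- ===== SOURCE B (Python) =====
-- from collections import Counter
-- from typing import Dict, List, Set, Tuple
--
--
-- def _get_text(item: object) -> str:
--     if isinstance(item, (list, tuple)) and len(item) == 2:
--         return str(item[1])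
--     return str(item)
--
--
-- def _runs(s, boundaries):
--     """Maximal runs [p, q) of non-boundary characters of s."""
--     runs = []
--     start = None
--     for idx, ch in enumerate(s):
--         if ch in boundaries:
--             if start is not None:
--                 runs.append((start, idx))
--                 start = None
--         elif start is None:
--             start = idx
--     if start is not None:
--         runs.append((start, len(s)))
--     return runs
--
--
-- def _emit_tokens(s, candidates, prefixes, max_len, allow, boundaries):
--     out = []
--     for p, q in _runs(s, boundaries):
--         left = s[p - 1] if p > 0 else None
--         right = s[q] if q < len(s) else None
--         for a in range(p, q):
--             stop = min(q, a + max_len)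
--             j = a + 1
--             while j <= stop:
--                 cur = s[a:j]
--                 if cur not in prefixes and (left is None or left + cur not in prefixes):
--                     break
--                 if j - a >= 2 and cur in candidates:
--                     out.append(cur)
--                 if allow and right is not None and j == q and j - a + 1 <= max_len:
--                     t = cur + right
--                     if t in candidates:
--                         out.append(t)
--                 if allow and left is not None and a == p and j - a + 1 <= max_len:
--                     t = left + cur
--                     if t in candidates:
--                         out.append(t)
--                 j += 1
--     return out
--
--
-- def _collect_doc_stats_chunk(
--     args: Tuple[List[object], Set[str], int, bool, int, Set[str]]
-- ) -> Tuple[Counter, Dict[str, int]]: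
--     items, candidates, max_len, allow_boundary_at_ends, max_chars_per_sample, boundaries = args
--     prefixes = set()
--     for t in candidates:
--         for k in range(1, len(t) + 1):
--             prefixes.add(t[:k])
--     doc_freq: Counter = Counter()
--     max_in_doc: Dict[str, int] = {}
--     for item in items:
--         s = _get_text(item)[:max_chars_per_sample]
--         local = Counter(_emit_tokens(s, candidates, prefixes, max_len,
--                                      allow_boundary_at_ends, boundaries))
--         for tok, cnt in local.items():
--             doc_freq[tok] += 1
--             if cnt > max_in_doc.get(tok, 0):
--                 max_in_doc[tok] = cnt
--     return doc_freq, max_in_doc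
-- ===== Notes on version B (the rewrite author's own statement) =====
-- stated objective: alternative
-- what changed: B splits each document once into maximal non-boundary runs and scans candidates with a precomputed candidate-prefix set that lets the inner substring scan break as soon as no candidate (plain or left-boundary-extended) can still match, collecting tokens into a list counted by Counter(), instead of A's per-position boundary re-tests and unconditional max_len-deep substring enumeration.
import Mathlib
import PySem

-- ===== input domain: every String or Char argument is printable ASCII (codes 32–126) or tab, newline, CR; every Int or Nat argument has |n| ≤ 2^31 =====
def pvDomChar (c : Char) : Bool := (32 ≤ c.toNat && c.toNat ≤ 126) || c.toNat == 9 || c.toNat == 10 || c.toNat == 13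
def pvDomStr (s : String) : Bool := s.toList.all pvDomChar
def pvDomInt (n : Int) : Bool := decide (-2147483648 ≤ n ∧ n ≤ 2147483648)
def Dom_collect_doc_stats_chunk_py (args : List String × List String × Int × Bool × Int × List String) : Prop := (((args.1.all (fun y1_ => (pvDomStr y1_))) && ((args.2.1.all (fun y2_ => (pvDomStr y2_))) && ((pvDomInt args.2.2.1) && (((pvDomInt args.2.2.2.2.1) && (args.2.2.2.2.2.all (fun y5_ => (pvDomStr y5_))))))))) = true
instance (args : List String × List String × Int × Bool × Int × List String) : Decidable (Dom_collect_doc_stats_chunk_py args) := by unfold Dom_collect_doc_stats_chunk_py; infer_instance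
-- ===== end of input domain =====

-- B re-implements A by splitting each document into maximal non-boundary runs and pruning the
-- inner substring scan with a precomputed candidate-prefix set; same return value, different algorithm.

-- ===== PORT A =====
-- inner `while j < n and (j - i) < max_len and s[j] not in boundaries` loop of A
-- one pass of the inner loop body of A (after `j += 1`; j' is the new j)
def pvAStep (cs : List Char) (cand bnd : List String) (maxLen : Int) (allow : Bool)
    (i j' : Nat) (loc : PySem.Dict String Int) : PySem.Dict String Int :=
  let cur := String.ofList ((cs.drop i).take (j' - i))   -- cur = s[i:j]
  let loc1 := if 2 ≤ j' - i ∧ cand.contains cur = true then loc.modify cur 0 (· + 1) else loc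
  if allow then
    let locA :=
      if j' < cs.length ∧ ((j' - i : Nat) : Int) + 1 ≤ maxLen ∧
          bnd.contains (String.ofList [cs.getD j' ' ']) = true then
        let t := cur ++ String.ofList [cs.getD j' ' ']
        if cand.contains t = true then loc1.modify t 0 (· + 1) else loc1
      else loc1
    if 0 < i ∧ ((j' - i : Nat) : Int) + 1 ≤ maxLen ∧
        bnd.contains (String.ofList [cs.getD (i - 1) ' ']) = true then
      let t := String.ofList [cs.getD (i - 1) ' '] ++ cur
      if cand.contains t = true then locA.modify t 0 (· + 1) else locA
    else locA
  else loc1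

-- inner `while j < n and (j - i) < max_len and s[j] not in boundaries` loop of A
def pvAInner (cs : List Char) (cand bnd : List String) (maxLen : Int) (allow : Bool)
    (i j : Nat) (loc : PySem.Dict String Int) : PySem.Dict String Int :=
  if h : j < cs.length ∧ ((j : Int) - (i : Int) < maxLen) ∧
      ¬ (bnd.contains (String.ofList [cs.getD j ' ']) = true) then
    pvAInner cs cand bnd maxLen allow i (j + 1)
      (pvAStep cs cand bnd maxLen allow i (j + 1) loc)
  else loc
termination_by cs.length - j
decreasing_by omega

-- outer `while i < n` loop of A
def pvAOuter (cs : List Char) (cand bnd : List String) (maxLen : Int) (allow : Bool)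
    (i : Nat) (loc : PySem.Dict String Int) : PySem.Dict String Int :=
  if h : i < cs.length then
    if bnd.contains (String.ofList [cs.getD i ' ']) = true then
      pvAOuter cs cand bnd maxLen allow (i + 1) loc
    else
      pvAOuter cs cand bnd maxLen allow (i + 1) (pvAInner cs cand bnd maxLen allow i i loc)
  else loc
termination_by cs.length - i

def collect_doc_stats_chunk_py (args : List String × List String × Int × Bool × Int × List String) :
    (List (String × Int)) × (List (String × Int)) :=
  match args with
  | (items, candidates, max_len, allow_boundary_at_ends, max_chars_per_sample, boundaries) =>
    let res := items.foldl (fun (st : PySem.Dict String Int × PySem.Dict String Int) item =>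
      -- text = _get_text(item) = item (items are strings); s = text[:max_chars_per_sample]
      let s := PySem.List.slice item.toList none (some max_chars_per_sample)
      let loc := pvAOuter s candidates boundaries max_len allow_boundary_at_ends 0 PySem.Dict.empty
      -- for tok in local: …
      loc.keys.foldl (fun (st2 : PySem.Dict String Int × PySem.Dict String Int) tok =>
        let df := st2.1.modify tok 0 (· + 1)
        let prev := st2.2.getD tok 0
        let mx := if loc.getD tok 0 > prev then st2.2.insert tok (loc.getD tok 0) else st2.2
        (df, mx)) st) (PySem.Dict.empty, PySem.Dict.empty)
    (res.1.items, res.2.items)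

-- ===== PORT B =====
-- prefixes = { t[:k] | t in candidates, 1 ≤ k ≤ len(t) }
def pvPrefixes (cand : List String) : PySem.Set String :=
  cand.foldl (fun ps t =>
    (PySem.List.pyRange 1 (PySem.Str.len t + 1) 1).foldl
      (fun ps k => PySem.Set.add ps (PySem.Str.slice t none (some k))) ps) []

-- _runs: maximal runs [p, q) of non-boundary characters
def pvRuns (cs : List Char) (bnd : List String) : List (Int × Int) :=
  let st := (PySem.List.enumerate cs 0).foldl
    (fun (st : List (Int × Int) × Option Int) pr =>
      if bnd.contains (String.ofList [pr.2]) = true then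
        match st.2 with
        | some s0 => (st.1 ++ [(s0, pr.1)], none)
        | none => (st.1, none)
      else
        match st.2 with
        | none => (st.1, some pr.1)
        | some s0 => (st.1, some s0)) ([], none)
  match st.2 with
  | some s0 => st.1 ++ [(s0, (cs.length : Int))]
  | none => st.1

-- appends of one pass of the `while j <= stop` loop body of _emit_tokens
def pvBStep (cs : List Char) (cand : List String) (allow : Bool) (maxLen : Int)
    (left right : Option Char) (p q a j : Int) (acc : List String) : List String :=
  let cur := String.ofList (PySem.List.slice cs (some a) (some j))
  let acc1 := if 2 ≤ j - a ∧ cand.contains cur = true then acc ++ [cur] else acc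
  let acc2 :=
    if allow = true ∧ right.isSome = true ∧ j = q ∧ j - a + 1 ≤ maxLen then
      let t := cur ++ String.ofList [right.getD ' ']
      if cand.contains t = true then acc1 ++ [t] else acc1
    else acc1
  if allow = true ∧ left.isSome = true ∧ a = p ∧ j - a + 1 ≤ maxLen then
    let t := String.ofList [left.getD ' '] ++ cur
    if cand.contains t = true then acc2 ++ [t] else acc2
  else acc2

-- the `while j <= stop` loop of _emit_tokens (with the prefix-set break)
def pvEmitFrom (cs : List Char) (cand pfx : List String) (allow : Bool) (maxLen : Int)
    (left right : Option Char) (p q a stop j : Int) (acc : List String) : List String :=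
  if h : j ≤ stop then
    let cur := String.ofList (PySem.List.slice cs (some a) (some j))
    if (!pfx.contains cur && left.all (fun lc => !pfx.contains (String.ofList [lc] ++ cur))) = true then
      acc   -- break
    else
      pvEmitFrom cs cand pfx allow maxLen left right p q a stop (j + 1)
        (pvBStep cs cand allow maxLen left right p q a j acc)
  else acc
termination_by (stop + 1 - j).toNat
decreasing_by omega

def pvEmitTokens (cs : List Char) (cand pfx bnd : List String) (maxLen : Int) (allow : Bool) :
    List String :=
  (pvRuns cs bnd).foldl (fun out pr =>
    let p := pr.1
    let q := pr.2
    let left := if p > 0 then some (cs.getD (p - 1).toNat ' ') else none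
    let right := if q < (cs.length : Int) then some (cs.getD q.toNat ' ') else none
    (PySem.List.pyRange p q 1).foldl (fun out a =>
      pvEmitFrom cs cand pfx allow maxLen left right p q a (min q (a + maxLen)) (a + 1) out) out) []

def collect_doc_stats_chunk_py_alt (args : List String × List String × Int × Bool × Int × List String) :
    (List (String × Int)) × (List (String × Int)) :=
  match args with
  | (items, candidates, max_len, allow_boundary_at_ends, max_chars_per_sample, boundaries) =>
    let pfx := pvPrefixes candidates
    let res := items.foldl (fun (st : PySem.Dict String Int × PySem.Dict String Int) item =>
      let s := PySem.List.slice item.toList none (some max_chars_per_sample)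
      let loc := PySem.Dict.counter
        (pvEmitTokens s candidates pfx boundaries max_len allow_boundary_at_ends)
      -- for tok, cnt in local.items(): …
      loc.items.foldl (fun (st2 : PySem.Dict String Int × PySem.Dict String Int) pr =>
        let df := st2.1.modify pr.1 0 (· + 1)
        let mx := if pr.2 > st2.2.getD pr.1 0 then st2.2.insert pr.1 pr.2 else st2.2
        (df, mx)) st) (PySem.Dict.empty, PySem.Dict.empty)
    (res.1.items, res.2.items)

-- ===== PRECONDITION & SPEC =====
def Spec_collect_doc_stats_chunk_py (args : List String × List String × Int × Bool × Int × List String) (out : (List (String × Int)) × (List (String × Int))) : Prop := out = collect_doc_stats_chunk_py_alt args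
instance (args : List String × List String × Int × Bool × Int × List String) (out : (List (String × Int)) × (List (String × Int))) : Decidable (Spec_collect_doc_stats_chunk_py args out) := by unfold Spec_collect_doc_stats_chunk_py; infer_instance

-- ===== CLAIM (what is proved, stated in full; the proofs are below) =====
def Claim_equal_collect_doc_stats_chunk_py : Prop := ∀ (args : List String × List String × Int × Bool × Int × List String), Dom_collect_doc_stats_chunk_py args → Spec_collect_doc_stats_chunk_py args (collect_doc_stats_chunk_py args)

-- ===== LEMMAS AND PROOFS =====

-- abbreviation for the Counter update `d[t] += 1`
def pvUpd (d : PySem.Dict String Int) (t : String) : PySem.Dict String Int := d.modify t 0 (· + 1)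

-- `s[k] in boundaries`
def gBndAt (cs : List Char) (bnd : List String) (k : Nat) : Bool :=
  bnd.contains (String.ofList [cs.getD k ' '])

-- tokens A emits in one pass of its inner loop body (j' is the incremented j)
def gStep (cs : List Char) (cand bnd : List String) (maxLen : Int) (allow : Bool)
    (i j' : Nat) : List String :=
  let cur := String.ofList ((cs.drop i).take (j' - i))
  (if 2 ≤ j' - i ∧ cand.contains cur = true then [cur] else []) ++
  (if allow then
    (if j' < cs.length ∧ ((j' - i : Nat) : Int) + 1 ≤ maxLen ∧
        bnd.contains (String.ofList [cs.getD j' ' ']) = true then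
      (let t := cur ++ String.ofList [cs.getD j' ' ']
       if cand.contains t = true then [t] else [])
     else []) ++
    (if 0 < i ∧ ((j' - i : Nat) : Int) + 1 ≤ maxLen ∧
        bnd.contains (String.ofList [cs.getD (i - 1) ' ']) = true then
      (let t := String.ofList [cs.getD (i - 1) ' '] ++ cur
       if cand.contains t = true then [t] else [])
     else [])
   else [])

-- tokens A emits in its inner loop from test index j on
def gInner (cs : List Char) (cand bnd : List String) (maxLen : Int) (allow : Bool)
    (i j : Nat) : List String :=
  if h : j < cs.length ∧ ((j : Int) - (i : Int) < maxLen) ∧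
      ¬ (bnd.contains (String.ofList [cs.getD j ' ']) = true) then
    gStep cs cand bnd maxLen allow i (j + 1) ++ gInner cs cand bnd maxLen allow i (j + 1)
  else []
termination_by cs.length - j
decreasing_by omega

-- tokens A emits in its outer loop from position i on
def gOuter (cs : List Char) (cand bnd : List String) (maxLen : Int) (allow : Bool)
    (i : Nat) : List String :=
  if h : i < cs.length then
    (if gBndAt cs bnd i = true then [] else gInner cs cand bnd maxLen allow i i) ++
      gOuter cs cand bnd maxLen allow (i + 1)
  else []
termination_by cs.length - i

-- B's break test
def gDead (pfx : List String) (left : Option Char) (cur : String) : Bool :=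
  !pfx.contains cur && left.all (fun lc => !pfx.contains (String.ofList [lc] ++ cur))

-- tokens B emits for one value of j
def gBStep (cs : List Char) (cand : List String) (allow : Bool) (maxLen : Int)
    (left right : Option Char) (p q a j : Int) : List String :=
  let cur := String.ofList (PySem.List.slice cs (some a) (some j))
  (if 2 ≤ j - a ∧ cand.contains cur = true then [cur] else []) ++
  ((if allow = true ∧ right.isSome = true ∧ j = q ∧ j - a + 1 ≤ maxLen then
     (let t := cur ++ String.ofList [right.getD ' ']
      if cand.contains t = true then [t] else [])
    else []) ++
   (if allow = true ∧ left.isSome = true ∧ a = p ∧ j - a + 1 ≤ maxLen then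
     (let t := String.ofList [left.getD ' '] ++ cur
      if cand.contains t = true then [t] else [])
    else []))

-- acc-free form of pvEmitFrom
def gEmitP (cs : List Char) (cand pfx : List String) (allow : Bool) (maxLen : Int)
    (left right : Option Char) (p q a stop j : Int) : List String :=
  if h : j ≤ stop then
    let cur := String.ofList (PySem.List.slice cs (some a) (some j))
    if gDead pfx left cur = true then []
    else gBStep cs cand allow maxLen left right p q a j ++
      gEmitP cs cand pfx allow maxLen left right p q a stop (j + 1)
  else []
termination_by (stop + 1 - j).toNat
decreasing_by omega

-- the same loop without the break
def gEmitU (cs : List Char) (cand : List String) (allow : Bool) (maxLen : Int)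
    (left right : Option Char) (p q a stop j : Int) : List String :=
  if h : j ≤ stop then
    gBStep cs cand allow maxLen left right p q a j ++
      gEmitU cs cand allow maxLen left right p q a stop (j + 1)
  else []
termination_by (stop + 1 - j).toNat
decreasing_by omega

-- structural form of _runs
def gRuns (bnd : List String) : List Char → Nat → Option Nat → List (Nat × Nat)
  | [], idx, start =>
    match start with
    | some s0 => [(s0, idx)]
    | none => []
  | c :: rest, idx, start =>
    if bnd.contains (String.ofList [c]) = true then
      match start with
      | some s0 => (s0, idx) :: gRuns bnd rest (idx + 1) none
      | none => gRuns bnd rest (idx + 1) none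
    else gRuns bnd rest (idx + 1) (some (start.getD idx))

-- first boundary position ≥ i (or the length)
def gQEnd (cs : List Char) (bnd : List String) (i : Nat) : Nat :=
  if h : i < cs.length then
    if gBndAt cs bnd i = true then i else gQEnd cs bnd (i + 1)
  else cs.length
termination_by cs.length - i

-- B's tokens for the whole run [p, q)
def gRunToks (cs : List Char) (cand pfx : List String) (allow : Bool) (maxLen : Int)
    (p q : Nat) : List String :=
  (PySem.List.pyRange (p : Int) (q : Int) 1).flatMap (fun a =>
    gEmitP cs cand pfx allow maxLen
      (if (p : Int) > 0 then some (cs.getD ((p : Int) - 1).toNat ' ') else none)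
      (if (q : Int) < (cs.length : Int) then some (cs.getD (q : Int).toNat ' ') else none)
      (p : Int) (q : Int) a (min (q : Int) (a + maxLen)) (a + 1))

-- B's tokens for the pending (not yet closed) run started at s, scanned up to i
def gPend (cs : List Char) (cand pfx bnd : List String) (allow : Bool) (maxLen : Int)
    (s i : Nat) : List String :=
  (PySem.List.pyRange (s : Int) (i : Int) 1).flatMap (fun a =>
    gEmitP cs cand pfx allow maxLen
      (if (s : Int) > 0 then some (cs.getD ((s : Int) - 1).toNat ' ') else none)
      (if ((gQEnd cs bnd i : Nat) : Int) < (cs.length : Int) then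
        some (cs.getD ((gQEnd cs bnd i : Nat) : Int).toNat ' ') else none)
      (s : Int) ((gQEnd cs bnd i : Nat) : Int) a
      (min ((gQEnd cs bnd i : Nat) : Int) (a + maxLen)) (a + 1))

-- scan invariant of _runs
def gInv (cs : List Char) (bnd : List String) : Option Nat → Nat → Prop
  | none, i => i = 0 ∨ (0 < i ∧ gBndAt cs bnd (i - 1) = true)
  | some s, i => s ≤ i ∧ (s = 0 ∨ (0 < s ∧ gBndAt cs bnd (s - 1) = true)) ∧
      ∀ k, s ≤ k → k < i → gBndAt cs bnd k = false

-- closure property of the prefix set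
def gClosed (cand pfx : List String) : Prop :=
  ∀ (x : List Char) (t : String), t ∈ cand → x ≠ [] → x <+: t.toList →
    pfx.contains (String.ofList x) = true

-- ----- A-side fold lemmas -----

theorem pvAStep_fold (cs : List Char) (cand bnd : List String) (maxLen : Int) (allow : Bool)
    (i j' : Nat) (loc : PySem.Dict String Int) :
    pvAStep cs cand bnd maxLen allow i j' loc =
      (gStep cs cand bnd maxLen allow i j').foldl pvUpd loc := by
  simp only [pvAStep, gStep]
  split_ifs <;> simp_all [pvUpd]

theorem pvAInner_eq (cs : List Char) (cand bnd : List String) (maxLen : Int) (allow : Bool)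
    (i : Nat) : ∀ (k j : Nat) (loc : PySem.Dict String Int), cs.length - j ≤ k →
    pvAInner cs cand bnd maxLen allow i j loc =
      (gInner cs cand bnd maxLen allow i j).foldl pvUpd loc := by
  intro k
  induction k with
  | zero =>
    intro j loc hk
    rw [pvAInner, gInner]
    split_ifs with h
    · omega
    · rfl
  | succ k ih =>
    intro j loc hk
    rw [pvAInner, gInner]
    split_ifs with h
    · rw [List.foldl_append, ih (j + 1) _ (by omega), pvAStep_fold]
    · rfl

theorem pvAOuter_eq (cs : List Char) (cand bnd : List String) (maxLen : Int) (allow : Bool) :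
    ∀ (k i : Nat) (loc : PySem.Dict String Int), cs.length - i ≤ k →
    pvAOuter cs cand bnd maxLen allow i loc =
      (gOuter cs cand bnd maxLen allow i).foldl pvUpd loc := by
  intro k
  induction k with
  | zero =>
    intro i loc hk
    rw [pvAOuter, gOuter]
    split_ifs <;> first | omega | rfl
  | succ k ih =>
    intro i loc hk
    rw [pvAOuter, gOuter]
    simp only [gBndAt]
    split_ifs with h hb
    · rw [List.foldl_append, ih (i + 1) _ (by omega)]
      rfl
    · rw [List.foldl_append, ih (i + 1) _ (by omega),
        pvAInner_eq cs cand bnd maxLen allow i (cs.length) i loc (by omega)]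
    · rfl

-- ----- B-side fold lemmas -----

theorem pvBStep_fold (cs : List Char) (cand : List String) (allow : Bool) (maxLen : Int)
    (left right : Option Char) (p q a j : Int) (acc : List String) :
    pvBStep cs cand allow maxLen left right p q a j acc =
      acc ++ gBStep cs cand allow maxLen left right p q a j := by
  simp only [pvBStep, gBStep]
  split_ifs <;> simp_all

theorem pvEmitFrom_eq (cs : List Char) (cand pfx : List String) (allow : Bool) (maxLen : Int)
    (left right : Option Char) (p q a stop : Int) :
    ∀ (k : Nat) (j : Int) (acc : List String), (stop + 1 - j).toNat ≤ k →
    pvEmitFrom cs cand pfx allow maxLen left right p q a stop j acc =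
      acc ++ gEmitP cs cand pfx allow maxLen left right p q a stop j := by
  intro k
  induction k with
  | zero =>
    intro j acc hk
    rw [pvEmitFrom, gEmitP]
    split_ifs with h
    · omega
    · simp
  | succ k ih =>
    intro j acc hk
    rw [pvEmitFrom, gEmitP]
    simp only [gDead]
    split_ifs with h hd
    · simp
    · rw [ih (j + 1) _ (by omega), pvBStep_fold, List.append_assoc]
    · simp

-- ----- prefix-set lemmas -----

theorem mem_foldl_setadd_mono (g : Int → String) (ys : List Int) :
    ∀ (ps : PySem.Set String) (x : String), x ∈ ps →
      x ∈ ys.foldl (fun ps k => PySem.Set.add ps (g k)) ps := by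
  induction ys with
  | nil => intro ps x hx; simpa using hx
  | cons y ys ih =>
    intro ps x hx
    simp only [List.foldl_cons]
    exact ih _ _ ((PySem.Set.mem_add _ _ _).mpr (Or.inl hx))

theorem mem_foldl_setadd_self (g : Int → String) (ys : List Int) :
    ∀ (ps : PySem.Set String) (k : Int), k ∈ ys →
      g k ∈ ys.foldl (fun ps k => PySem.Set.add ps (g k)) ps := by
  induction ys with
  | nil => intro ps k hk; simp at hk
  | cons y ys ih =>
    intro ps k hk
    simp only [List.foldl_cons]
    rcases List.mem_cons.mp hk with h | h
    · subst h
      exact mem_foldl_setadd_mono g ys _ _ ((PySem.Set.mem_add _ _ _).mpr (Or.inr rfl))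
    · exact ih _ _ h

theorem mem_pvPrefixes_outer_mono (F : PySem.Set String → String → PySem.Set String)
    (hF : ∀ ps t x, x ∈ ps → x ∈ F ps t) (cand : List String) :
    ∀ (ps : PySem.Set String) (x : String), x ∈ ps → x ∈ cand.foldl F ps := by
  induction cand with
  | nil => intro ps x hx; simpa using hx
  | cons t cand ih =>
    intro ps x hx
    exact ih _ _ (hF _ _ _ hx)

theorem pvPrefixes_closed (cand : List String) : gClosed cand (pvPrefixes cand) := by
  intro x t ht hx hp
  rw [List.contains_iff_mem]
  have hxtake : x = t.toList.take x.length := List.prefix_iff_eq_take.mp hp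
  have hxlen : 1 ≤ x.length := by
    cases x with
    | nil => exact absurd rfl hx
    | cons a l => simp
  have hxle : x.length ≤ t.toList.length := hp.length_le
  have hlen : PySem.Str.len t = (t.toList.length : Int) := by simp [pysem]
  have hval : PySem.Str.slice t none (some (x.length : Int)) = String.ofList x := by
    have h1 : (PySem.Str.slice t none (some (x.length : Int))).toList = x := by
      rw [PySem.Str.toList_slice]
      simp only [PySem.Chars.slice_eq_listSlice]
      rw [PySem.List.slice_to _ (Int.natCast_nonneg x.length)]
      simp [← hxtake]
    calc PySem.Str.slice t none (some (x.length : Int))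
        = String.ofList ((PySem.Str.slice t none (some (x.length : Int))).toList) :=
          (String.ofList_toList).symm
      _ = String.ofList x := by rw [h1]
  unfold pvPrefixes
  obtain ⟨l1, l2, rfl⟩ := List.append_of_mem ht
  rw [List.foldl_append, List.foldl_cons]
  apply mem_pvPrefixes_outer_mono _ (fun ps u y hy => mem_foldl_setadd_mono _ _ _ _ hy) l2
  show String.ofList x ∈ _
  have hmem : ((x.length : Nat) : Int) ∈ PySem.List.pyRange 1 (PySem.Str.len t + 1) 1 := by
    rw [PySem.List.mem_pyRange_one, hlen]
    omega
  have h2 : ∀ ps0 : PySem.Set String, String.ofList x ∈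
      List.foldl (fun ps k => ps.add (PySem.Str.slice t none (some k))) ps0
        (PySem.List.pyRange 1 (PySem.Str.len t + 1) 1) := by
    intro ps0
    have h3 := mem_foldl_setadd_self (fun k => PySem.Str.slice t none (some k))
      (PySem.List.pyRange 1 (PySem.Str.len t + 1) 1) ps0 (x.length : Int) hmem
    simpa [hval] using h3
  exact h2 _

-- ----- pruning lemmas -----

theorem gEmitU_dead (cs : List Char) (cand pfx : List String) (allow : Bool) (maxLen : Int)
    (left right : Option Char) (p q a stop j0 : Int)
    (hclo : gClosed cand pfx) (ha : 0 ≤ a) (haj : a < j0) (hj0s : j0 ≤ stop)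
    (hstop : stop ≤ (cs.length : Int))
    (hdead : gDead pfx left (String.ofList (PySem.List.slice cs (some a) (some j0))) = true) :
    ∀ (k : Nat) (j : Int), (stop + 1 - j).toNat ≤ k → j0 ≤ j →
      gEmitU cs cand allow maxLen left right p q a stop j = [] := by
  have hd1 : pfx.contains (String.ofList (PySem.List.slice cs (some a) (some j0))) = false := by
    simp only [gDead, Bool.and_eq_true, Bool.not_eq_true'] at hdead
    exact hdead.1
  have hd2 : ∀ lc, left = some lc →
      pfx.contains (String.ofList (lc :: PySem.List.slice cs (some a) (some j0))) = false := by
    intro lc hlc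
    simp only [gDead, hlc, Bool.and_eq_true, Option.all_some, Bool.not_eq_true'] at hdead
    rw [← String.ofList_append] at hdead
    exact hdead.2
  have hsl0 : PySem.List.slice cs (some a) (some j0) =
      (cs.drop a.toNat).take (j0.toNat - a.toNat) := PySem.List.slice_toNat cs ha (by omega)
  have hne : PySem.List.slice cs (some a) (some j0) ≠ [] := by
    apply List.ne_nil_of_length_pos
    rw [hsl0]
    simp only [List.length_take, List.length_drop]
    omega
  intro k
  induction k with
  | zero =>
    intro j hk hj
    rw [gEmitU]
    split_ifs with h
    · omega
    · rfl
  | succ k ih =>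
    intro j hk hj
    rw [gEmitU]
    split_ifs with h
    case neg => rfl
    have hslj : PySem.List.slice cs (some a) (some j) =
        (cs.drop a.toNat).take (j.toNat - a.toNat) := PySem.List.slice_toNat cs ha (by omega)
    have hpre : PySem.List.slice cs (some a) (some j0) <+: PySem.List.slice cs (some a) (some j) := by
      rw [hsl0, hslj]
      exact List.take_prefix_take_left (by omega)
    have hch1 : (if 2 ≤ j - a ∧
        cand.contains (String.ofList (PySem.List.slice cs (some a) (some j))) = true then
        [String.ofList (PySem.List.slice cs (some a) (some j))] else []) = [] := by
      rw [if_neg]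
      rintro ⟨-, hc⟩
      have := hclo (PySem.List.slice cs (some a) (some j0)) _ (List.contains_iff_mem.mp hc) hne
        (by rw [String.toList_ofList]; exact hpre)
      rw [hd1] at this
      exact absurd this (by simp)
    have hch2 : (if allow = true ∧ right.isSome = true ∧ j = q ∧ j - a + 1 ≤ maxLen then
        (if cand.contains (String.ofList (PySem.List.slice cs (some a) (some j)) ++
              String.ofList [right.getD ' ']) = true then
          [String.ofList (PySem.List.slice cs (some a) (some j)) ++
            String.ofList [right.getD ' ']] else [])
        else []) = [] := by
      split_ifs with hc hcc
      · exfalso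
        have := hclo (PySem.List.slice cs (some a) (some j0)) _
          (List.contains_iff_mem.mp hcc) hne
          (by rw [← String.ofList_append, String.toList_ofList]
              exact hpre.trans (List.prefix_append _ _))
        rw [hd1] at this
        exact absurd this (by simp)
      · rfl
      · rfl
    have hch3 : (if allow = true ∧ left.isSome = true ∧ a = p ∧ j - a + 1 ≤ maxLen then
        (if cand.contains (String.ofList [left.getD ' '] ++
              String.ofList (PySem.List.slice cs (some a) (some j))) = true then
          [String.ofList [left.getD ' '] ++
            String.ofList (PySem.List.slice cs (some a) (some j))] else [])
        else []) = [] := by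
      split_ifs with hc hcc
      · exfalso
        obtain ⟨lc, hlc⟩ := Option.isSome_iff_exists.mp hc.2.1
        have hgd : left.getD ' ' = lc := by rw [hlc]; rfl
        have := hclo (lc :: PySem.List.slice cs (some a) (some j0)) _
          (List.contains_iff_mem.mp hcc) (by simp)
          (by rw [← String.ofList_append, String.toList_ofList, hgd]
              exact List.cons_prefix_cons.mpr ⟨rfl, hpre⟩)
        rw [hd2 lc hlc] at this
        exact absurd this (by simp)
      · rfl
      · rfl
    rw [ih (j + 1) (by omega) (by omega)]
    simp only [gBStep]
    rw [hch1, hch2, hch3]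
    simp

theorem gEmitP_eq_gEmitU (cs : List Char) (cand pfx : List String) (allow : Bool) (maxLen : Int)
    (left right : Option Char) (p q a stop : Int)
    (hclo : gClosed cand pfx) (ha : 0 ≤ a) (hstop : stop ≤ (cs.length : Int)) :
    ∀ (k : Nat) (j : Int), (stop + 1 - j).toNat ≤ k → a < j →
      gEmitP cs cand pfx allow maxLen left right p q a stop j =
        gEmitU cs cand allow maxLen left right p q a stop j := by
  intro k
  induction k with
  | zero =>
    intro j hk hja
    rw [gEmitP, gEmitU]
    split_ifs with h
    · omega
    · rfl
  | succ k ih =>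
    intro j hk hja
    rw [gEmitP, gEmitU]
    dsimp only
    split_ifs with h hd
    · have := gEmitU_dead cs cand pfx allow maxLen left right p q a stop j hclo ha hja h
        hstop hd (k + 1) j (by omega) (le_refl _)
      rw [gEmitU] at this
      rw [dif_pos h] at this
      exact this.symm
    · rw [ih (j + 1) (by omega) (by omega)]
    · rfl

-- ----- alignment of A's inner loop with B's per-start loop -----

theorem gStep_eq_gBStep (cs : List Char) (cand bnd : List String) (maxLen : Int) (allow : Bool)
    (p q i j' : Nat)
    (hq : q ≤ cs.length) (hpi : p ≤ i) (hij' : i < j') (hj'q : j' ≤ q)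
    (hrun : ∀ k, p ≤ k → k < q → gBndAt cs bnd k = false)
    (hqb : q < cs.length → gBndAt cs bnd q = true)
    (hpb : p = 0 ∨ (0 < p ∧ gBndAt cs bnd (p - 1) = true)) :
    gStep cs cand bnd maxLen allow i j' =
      gBStep cs cand allow maxLen
        (if (p : Int) > 0 then some (cs.getD ((p : Int) - 1).toNat ' ') else none)
        (if (q : Int) < (cs.length : Int) then some (cs.getD (q : Int).toNat ' ') else none)
        (p : Int) (q : Int) (i : Int) ((j' : Nat) : Int) := by
  have hcast : ((j' - i : Nat) : Int) = (j' : Int) - (i : Int) := by omega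
  have hcur : PySem.List.slice cs (some (i : Int)) (some (j' : Int)) =
      (cs.drop i).take (j' - i) := PySem.List.slice_natCast cs i j'
  simp only [gStep, gBStep, hcur, hcast]
  congr 1
  · apply if_congr _ rfl rfl
    constructor
    · rintro ⟨h2, hc⟩; exact ⟨by omega, hc⟩
    · rintro ⟨h2, hc⟩; exact ⟨by omega, hc⟩
  · by_cases hallow : allow = true
    case neg =>
      simp only [Bool.not_eq_true] at hallow
      simp [hallow]
    subst hallow
    simp only [eq_self_iff_true, if_true, true_and]
    congr 1
    · -- suffix-variant chunk
      by_cases hA : j' < cs.length ∧ ((j' : Int) - (i : Int)) + 1 ≤ maxLen ∧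
          bnd.contains (String.ofList [cs.getD j' ' ']) = true
      · have hj'q2 : j' = q := by
          by_contra hne
          have hlt : j' < q := lt_of_le_of_ne hj'q hne
          have hfalse := hrun j' (by omega) hlt
          simp only [gBndAt] at hfalse
          rw [hfalse] at hA
          exact absurd hA.2.2 (by simp)
        subst hj'q2
        have hqn : j' < cs.length := hA.1
        have hR : (if (j' : Int) < (cs.length : Int) then
            some (cs.getD (j' : Int).toNat ' ') else none) = some (cs.getD j' ' ') := by
          rw [if_pos (by exact_mod_cast hqn)]
          simp
        rw [hR]
        simp only [Option.getD_some, Option.isSome_some, eq_self_iff_true, true_and]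
        rw [if_pos hA, if_pos hA.2.1]
      · have hB : ¬((if (q : Int) < (cs.length : Int) then
            some (cs.getD (q : Int).toNat ' ') else none).isSome = true ∧
            (j' : Int) = (q : Int) ∧ ((j' : Int) - (i : Int)) + 1 ≤ maxLen) := by
          rintro ⟨hs, hjq, hml⟩
          have hj'q2 : j' = q := by exact_mod_cast hjq
          have hqn : q < cs.length := by
            by_contra hno
            rw [if_neg (by exact_mod_cast hno)] at hs
            simp at hs
          have hbq := hqb hqn
          simp only [gBndAt] at hbq
          subst hj'q2
          exact hA ⟨hqn, hml, hbq⟩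
        rw [if_neg hA, if_neg hB]
    · -- prefix-variant chunk
      by_cases hA : 0 < i ∧ ((j' : Int) - (i : Int)) + 1 ≤ maxLen ∧
          bnd.contains (String.ofList [cs.getD (i - 1) ' ']) = true
      · have hip : i = p := by
          by_contra hne
          have hlt : p < i := lt_of_le_of_ne hpi (fun h => hne h.symm)
          have hfalse := hrun (i - 1) (by omega) (by omega)
          simp only [gBndAt] at hfalse
          rw [hfalse] at hA
          exact absurd hA.2.2 (by simp)
        have hp0 : 0 < p := by omega
        have htn : ((p : Int) - 1).toNat = p - 1 := by omega
        have hL : (if (p : Int) > 0 then some (cs.getD ((p : Int) - 1).toNat ' ') else none) =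
            some (cs.getD (p - 1) ' ') := by
          rw [if_pos (by exact_mod_cast hp0), htn]
        have hA' : 0 < p ∧ ((j' : Int) - (p : Int)) + 1 ≤ maxLen ∧
            bnd.contains (String.ofList [cs.getD (p - 1) ' ']) = true := by
          rw [← hip]; exact hA
        rw [hL]
        simp only [Option.getD_some, Option.isSome_some, eq_self_iff_true, true_and]
        rw [hip]
        rw [if_pos hA', if_pos (And.intro (rfl : ((p : Nat) : Int) = ((p : Nat) : Int)) hA'.2.1)]
      · have hB : ¬((if (p : Int) > 0 then some (cs.getD ((p : Int) - 1).toNat ' ') else none).isSome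
            = true ∧ (i : Int) = (p : Int) ∧ ((j' : Int) - (i : Int)) + 1 ≤ maxLen) := by
          rintro ⟨hs, hip, hml⟩
          have hip2 : i = p := by exact_mod_cast hip
          have hp0 : 0 < p := by
            by_contra hno
            rw [if_neg (by omega : ¬ (p : Int) > 0)] at hs
            simp at hs
          subst hip2
          rcases hpb with h0 | ⟨-, hbp⟩
          · omega
          · simp only [gBndAt] at hbp
            exact hA ⟨hp0, hml, hbp⟩
        rw [if_neg hA, if_neg hB]

theorem gAlign (cs : List Char) (cand bnd : List String) (maxLen : Int) (allow : Bool)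
    (p q i : Nat)
    (hq : q ≤ cs.length) (hpi : p ≤ i) (hiq : i < q)
    (hrun : ∀ k, p ≤ k → k < q → gBndAt cs bnd k = false)
    (hqb : q < cs.length → gBndAt cs bnd q = true)
    (hpb : p = 0 ∨ (0 < p ∧ gBndAt cs bnd (p - 1) = true)) :
    ∀ (m j : Nat), q - j ≤ m → i ≤ j → j ≤ q →
      gInner cs cand bnd maxLen allow i j =
        gEmitU cs cand allow maxLen
          (if (p : Int) > 0 then some (cs.getD ((p : Int) - 1).toNat ' ') else none)
          (if (q : Int) < (cs.length : Int) then some (cs.getD (q : Int).toNat ' ') else none)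
          (p : Int) (q : Int) (i : Int) (min (q : Int) ((i : Int) + maxLen)) ((j : Int) + 1) := by
  intro m
  induction m with
  | zero =>
    intro j hm hij hjq
    have hjq2 : j = q := by omega
    subst hjq2
    rw [gInner, gEmitU]
    rw [dif_neg, dif_neg]
    · omega
    · rintro ⟨h1, -, h3⟩
      have := hqb h1
      simp only [gBndAt] at this
      exact h3 this
  | succ m ih =>
    intro j hm hij hjq
    rcases Nat.eq_or_lt_of_le hjq with hjq2 | hjq2
    · subst hjq2
      rw [gInner, gEmitU]
      rw [dif_neg, dif_neg]
      · omega
      · rintro ⟨h1, -, h3⟩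
        have := hqb h1
        simp only [gBndAt] at this
        exact h3 this
    · by_cases hc : (j : Int) - (i : Int) < maxLen
      · rw [gInner, gEmitU]
        rw [dif_pos ⟨by omega, hc, by
            have hf := hrun j (by omega) hjq2
            simp only [gBndAt] at hf
            intro hcon
            rw [hf] at hcon
            exact Bool.false_ne_true hcon⟩]
        rw [dif_pos (by omega)]
        have hcast : ((j + 1 : Nat) : Int) = (j : Int) + 1 := by push_cast; ring
        rw [gStep_eq_gBStep cs cand bnd maxLen allow p q i (j + 1) hq hpi (by omega) (by omega)
          hrun hqb hpb]
        rw [hcast]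
        rw [ih (j + 1) (by omega) (by omega) (by omega), hcast]
      · rw [gInner, gEmitU]
        rw [dif_neg (by rintro ⟨-, h2, -⟩; exact hc h2), dif_neg (by omega)]

-- ----- qEnd properties -----

theorem gQEnd_ge (cs : List Char) (bnd : List String) : ∀ (k i : Nat),
    cs.length - i ≤ k → i ≤ cs.length →
    i ≤ gQEnd cs bnd i ∧ gQEnd cs bnd i ≤ cs.length ∧
    (∀ j, i ≤ j → j < gQEnd cs bnd i → gBndAt cs bnd j = false) ∧
    (gQEnd cs bnd i < cs.length → gBndAt cs bnd (gQEnd cs bnd i) = true) := by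
  intro k
  induction k with
  | zero =>
    intro i hk hin
    rw [gQEnd]
    split_ifs <;>
      first
        | omega
        | exact ⟨by omega, by omega, fun j h1 h2 => by omega, fun h2 => by omega⟩
  | succ k ih =>
    intro i hk hin
    rw [gQEnd]
    split_ifs with h hb
    · exact ⟨le_refl _, by omega, fun j h1 h2 => by omega, fun _ => hb⟩
    · obtain ⟨ih1, ih2, ih3, ih4⟩ := ih (i + 1) (by omega) (by omega)
      refine ⟨by omega, ih2, fun j h1 h2 => ?_, ih4⟩
      rcases Nat.eq_or_lt_of_le h1 with h3 | h3
      · subst h3; simpa using hb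
      · exact ih3 j h3 h2
    · exact ⟨by omega, le_refl _, fun j h1 h2 => by omega, fun h2 => by omega⟩

theorem gQEnd_bnd (cs : List Char) (bnd : List String) (i : Nat) (h : i < cs.length)
    (hb : gBndAt cs bnd i = true) : gQEnd cs bnd i = i := by
  rw [gQEnd]; simp [h, hb]

theorem gQEnd_not_bnd (cs : List Char) (bnd : List String) (i : Nat) (h : i < cs.length)
    (hb : gBndAt cs bnd i = false) : gQEnd cs bnd i = gQEnd cs bnd (i + 1) := by
  rw [gQEnd]; simp [h, hb]

theorem gQEnd_end (cs : List Char) (bnd : List String) (i : Nat) (h : ¬ i < cs.length) :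
    gQEnd cs bnd i = cs.length := by
  rw [gQEnd]; simp [h]

-- ----- the main run-decomposition lemma -----

theorem gInner_eq_gEmitP (cs : List Char) (cand bnd pfx : List String) (maxLen : Int)
    (allow : Bool) (hclo : gClosed cand pfx) (p i : Nat)
    (hpi : p ≤ i) (hin : i < cs.length) (hbF : gBndAt cs bnd i = false)
    (hrunL : ∀ k, p ≤ k → k < i → gBndAt cs bnd k = false)
    (hpb : p = 0 ∨ (0 < p ∧ gBndAt cs bnd (p - 1) = true)) :
    gEmitP cs cand pfx allow maxLen
      (if (p : Int) > 0 then some (cs.getD ((p : Int) - 1).toNat ' ') else none)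
      (if ((gQEnd cs bnd i : Nat) : Int) < (cs.length : Int) then
        some (cs.getD ((gQEnd cs bnd i : Nat) : Int).toNat ' ') else none)
      (p : Int) ((gQEnd cs bnd i : Nat) : Int) (i : Int)
      (min ((gQEnd cs bnd i : Nat) : Int) ((i : Int) + maxLen)) ((i : Int) + 1)
    = gInner cs cand bnd maxLen allow i i := by
  obtain ⟨hq1, hq2, hq3, hq4⟩ := gQEnd_ge cs bnd (cs.length - i) i (le_refl _) (by omega)
  have hiq : i < gQEnd cs bnd i := by
    have h5 := gQEnd_not_bnd cs bnd i hin hbF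
    have h6 := (gQEnd_ge cs bnd (cs.length - (i + 1)) (i + 1) (le_refl _) (by omega)).1
    omega
  set q := gQEnd cs bnd i with hqdef
  have hrun : ∀ k, p ≤ k → k < q → gBndAt cs bnd k = false := by
    intro k h1 h2
    rcases Nat.lt_or_ge k i with h3 | h3
    · exact hrunL k h1 h3
    · exact hq3 k h3 h2
  rw [gEmitP_eq_gEmitU cs cand pfx allow maxLen _ _ _ _ _ _ hclo (by omega)
    (le_trans (min_le_left _ _) (by exact_mod_cast hq2))
    ((min (q : Int) ((i : Int) + maxLen) + 1 - ((i : Int) + 1)).toNat) ((i : Int) + 1)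
    (le_refl _) (by omega)]
  rw [← gAlign cs cand bnd maxLen allow p q i hq2 hpi hiq hrun hq4 hpb (q - i) i (le_refl _)
    (le_refl _) (by omega)]

theorem gMain (cs : List Char) (cand bnd pfx : List String) (maxLen : Int) (allow : Bool)
    (hclo : gClosed cand pfx) :
    ∀ (k i : Nat) (start : Option Nat), cs.length - i ≤ k → i ≤ cs.length →
      gInv cs bnd start i →
      (gRuns bnd (cs.drop i) i start).flatMap (fun pr =>
          gRunToks cs cand pfx allow maxLen pr.1 pr.2) =
        (match start with
          | none => []
          | some s => gPend cs cand pfx bnd allow maxLen s i) ++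
          gOuter cs cand bnd maxLen allow i := by
  intro k
  induction k with
  | zero =>
    intro i start hk hin hinv
    have hieq : i = cs.length := by omega
    subst hieq
    rw [List.drop_length, gOuter]
    rw [dif_neg (by omega)]
    cases start with
    | none => simp [gRuns]
    | some s =>
      dsimp only
      rw [gRuns]
      simp only [List.flatMap_cons, List.flatMap_nil, List.append_nil]
      rw [gPend, gQEnd_end cs bnd _ (by omega), gRunToks]
  | succ k ih =>
    intro i start hk hin hinv
    rcases Nat.lt_or_ge i cs.length with h | h
    case inr =>
      have hieq : i = cs.length := by omega
      subst hieq
      rw [List.drop_length, gOuter]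
      rw [dif_neg (by omega)]
      cases start with
      | none => simp [gRuns]
      | some s =>
        dsimp only
        rw [gRuns]
        simp only [List.flatMap_cons, List.flatMap_nil, List.append_nil]
        rw [gPend, gQEnd_end cs bnd _ (by omega), gRunToks]
    have hdrop : cs.drop i = cs[i] :: cs.drop (i + 1) := List.drop_eq_getElem_cons h
    have hg : cs.getD i ' ' = cs[i] := List.getD_eq_getElem cs ' ' h
    rw [hdrop, gRuns.eq_def]
    dsimp only
    rw [gOuter, dif_pos h]
    by_cases hb : gBndAt cs bnd i = true
    · have hb' : bnd.contains (String.ofList [cs[i]]) = true := by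
        rw [← hg]; exact hb
      rw [if_pos hb', if_pos hb]
      cases start with
      | none =>
        rw [ih (i + 1) none (by omega) (by omega) (Or.inr ⟨by omega, by simpa using hb⟩)]
        simp
      | some s =>
        dsimp only
        rw [List.flatMap_cons]
        rw [ih (i + 1) none (by omega) (by omega) (Or.inr ⟨by omega, by simpa using hb⟩)]
        rw [gPend, gQEnd_bnd cs bnd i h hb, gRunToks]
    · have hbF : gBndAt cs bnd i = false := by
        rw [Bool.eq_false_iff]; exact hb
      have hb' : ¬ bnd.contains (String.ofList [cs[i]]) = true := by
        rw [← hg]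
        intro hcon
        have : gBndAt cs bnd i = true := hcon
        rw [hbF] at this
        exact Bool.false_ne_true this
      rw [if_neg hb', if_neg (by rw [hbF]; simp)]
      -- invariant for the new start
      have hpi : (start.getD i) ≤ i := by
        cases start with
        | none => simp
        | some s => simpa using hinv.1
      have hrunL : ∀ j, (start.getD i) ≤ j → j < i → gBndAt cs bnd j = false := by
        cases start with
        | none => intro j h1 h2; simp only [Option.getD_none] at h1; omega
        | some s => intro j h1 h2; exact hinv.2.2 j (by simpa using h1) h2
      have hpb : (start.getD i) = 0 ∨
          (0 < (start.getD i) ∧ gBndAt cs bnd ((start.getD i) - 1) = true) := by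
        cases start with
        | none => simpa using hinv
        | some s => simpa using hinv.2.1
      have hinv' : gInv cs bnd (some (start.getD i)) (i + 1) := by
        refine ⟨by omega, hpb, ?_⟩
        intro j h1 h2
        rcases Nat.lt_or_ge j i with h3 | h3
        · exact hrunL j h1 h3
        · have : j = i := by omega
          subst this
          exact hbF
      rw [ih (i + 1) (some (start.getD i)) (by omega) (by omega) hinv']
      dsimp only
      -- split the pending range at i
      have hqe : gQEnd cs bnd (i + 1) = gQEnd cs bnd i :=
        (gQEnd_not_bnd cs bnd i h hbF).symm
      rw [gPend, hqe]
      have hcast : ((i + 1 : Nat) : Int) = (i : Int) + 1 := by push_cast; ring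
      rw [hcast, PySem.List.pyRange_one_succ_right (by exact_mod_cast hpi)]
      rw [List.flatMap_append]
      rw [show (List.flatMap (fun a =>
          gEmitP cs cand pfx allow maxLen
            (if ((start.getD i : Nat) : Int) > 0 then
              some (cs.getD (((start.getD i : Nat) : Int) - 1).toNat ' ') else none)
            (if ((gQEnd cs bnd i : Nat) : Int) < (cs.length : Int) then
              some (cs.getD ((gQEnd cs bnd i : Nat) : Int).toNat ' ') else none)
            ((start.getD i : Nat) : Int) ((gQEnd cs bnd i : Nat) : Int) a
            (min ((gQEnd cs bnd i : Nat) : Int) (a + maxLen)) (a + 1)) [(i : Int)])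
          = gInner cs cand bnd maxLen allow i i from by
        simp only [List.flatMap_cons, List.flatMap_nil, List.append_nil]
        exact gInner_eq_gEmitP cs cand bnd pfx maxLen allow hclo (start.getD i) i hpi h hbF
          hrunL hpb]
      cases start with
      | none =>
        simp only [Option.getD_none]
        rw [PySem.List.pyRange_one_eq_nil (le_refl _)]
        simp
      | some s =>
        dsimp only
        simp only [Option.getD_some]
        rw [gPend]
        simp [List.append_assoc]

-- ----- runs port vs ghost -----

theorem pvRunsLoop_eq (bnd : List String) : ∀ (cs : List Char) (idx : Nat)
    (runs0 : List (Int × Int)) (start : Option Nat),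
    (let st := (PySem.List.enumerate cs (idx : Int)).foldl
      (fun (st : List (Int × Int) × Option Int) pr =>
        if bnd.contains (String.ofList [pr.2]) = true then
          match st.2 with
          | some s0 => (st.1 ++ [(s0, pr.1)], none)
          | none => (st.1, none)
        else
          match st.2 with
          | none => (st.1, some pr.1)
          | some s0 => (st.1, some s0)) (runs0, start.map (fun s => (s : Int)));
     match st.2 with
     | some s0 => st.1 ++ [(s0, ((idx + cs.length : Nat) : Int))]
     | none => st.1)
    = runs0 ++ (gRuns bnd cs idx start).map (fun pr => ((pr.1 : Int), (pr.2 : Int))) := by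
  intro cs
  induction cs with
  | nil =>
    intro idx runs0 start
    cases start <;> simp [PySem.List.enumerate, gRuns]
  | cons c rest ih =>
    intro idx runs0 start
    rw [PySem.List.enumerate_cons]
    simp only [List.foldl_cons]
    by_cases hb : bnd.contains (String.ofList [c]) = true
    · cases start with
      | none =>
        simp only [Option.map_none, hb, if_true]
        have h := ih (idx + 1) runs0 none
        simp only [Option.map_none] at h
        rw [gRuns]
        simp only [hb, if_true]
        rw [show ((idx + 1 + rest.length : Nat) : Int) = ((idx + (c :: rest).length : Nat) : Int) by
          simp [List.length_cons]; omega] at h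
        exact h
      | some s =>
        simp only [Option.map_some, hb, if_true]
        have h := ih (idx + 1) (runs0 ++ [((s : Int), (idx : Int))]) none
        simp only [Option.map_none] at h
        rw [gRuns]
        simp only [hb, if_true]
        rw [show ((idx + 1 + rest.length : Nat) : Int) = ((idx + (c :: rest).length : Nat) : Int) by
          simp [List.length_cons]; omega] at h
        simp only [List.map_cons]
        rw [List.append_assoc] at h
        simpa using h
    · cases start with
      | none =>
        simp only [Option.map_none, hb, if_false]
        have h := ih (idx + 1) runs0 (some idx)
        simp only [Option.map_some] at h
        rw [gRuns]
        simp only [hb, if_false]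
        rw [show ((idx + 1 + rest.length : Nat) : Int) = ((idx + (c :: rest).length : Nat) : Int) by
          simp [List.length_cons]; omega] at h
        simpa using h
      | some s =>
        simp only [Option.map_some, hb, if_false]
        have h := ih (idx + 1) runs0 (some s)
        simp only [Option.map_some] at h
        rw [gRuns]
        simp only [hb, if_false]
        rw [show ((idx + 1 + rest.length : Nat) : Int) = ((idx + (c :: rest).length : Nat) : Int) by
          simp [List.length_cons]; omega] at h
        simpa using h

theorem pvRuns_eq (cs : List Char) (bnd : List String) :
    pvRuns cs bnd = (gRuns bnd cs 0 none).map (fun pr => ((pr.1 : Int), (pr.2 : Int))) := by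
  have h := pvRunsLoop_eq bnd cs 0 [] none
  simp only [Option.map_none, Nat.zero_add, List.nil_append] at h
  unfold pvRuns
  simpa using h

theorem pvEmitTokens_eq (cs : List Char) (cand pfx bnd : List String) (maxLen : Int)
    (allow : Bool) :
    pvEmitTokens cs cand pfx bnd maxLen allow =
      (gRuns bnd cs 0 none).flatMap (fun pr =>
        gRunToks cs cand pfx allow maxLen pr.1 pr.2) := by
  have hinner : ∀ (P Q : Int) (L R : Option Char) (out : List String),
      (PySem.List.pyRange P Q 1).foldl (fun out a =>
        pvEmitFrom cs cand pfx allow maxLen L R P Q a (min Q (a + maxLen)) (a + 1) out) out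
      = out ++ (PySem.List.pyRange P Q 1).flatMap (fun a =>
          gEmitP cs cand pfx allow maxLen L R P Q a (min Q (a + maxLen)) (a + 1)) := by
    intro P Q L R out
    rw [PySem.List.foldl_congr_mem _ _
      (fun (out : List String) (a : Int) => out ++
        gEmitP cs cand pfx allow maxLen L R P Q a (min Q (a + maxLen)) (a + 1)) _
      (fun acc x _ => pvEmitFrom_eq cs cand pfx allow maxLen L R P Q x (min Q (x + maxLen))
        ((min Q (x + maxLen) + 1 - (x + 1)).toNat) (x + 1) acc (le_refl _))]
    exact PySem.List.foldl_append_eq_flatMap _ _ _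
  rw [pvEmitTokens, pvRuns_eq, List.foldl_map]
  trans (List.foldl (fun (out : List String) (pr : Nat × Nat) =>
    out ++ gRunToks cs cand pfx allow maxLen pr.1 pr.2) [] (gRuns bnd cs 0 none))
  · refine PySem.List.foldl_congr_mem _ _ _ _ (fun acc pr _ => ?_)
    dsimp only
    rw [hinner, gRunToks]
  · rw [PySem.List.foldl_append_eq_flatMap]
    simp

-- ----- per-document equality -----

theorem perDoc (cs : List Char) (cand bnd : List String) (maxLen : Int) (allow : Bool) :
    pvAOuter cs cand bnd maxLen allow 0 PySem.Dict.empty =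
      PySem.Dict.counter (pvEmitTokens cs cand (pvPrefixes cand) bnd maxLen allow) := by
  rw [pvAOuter_eq cs cand bnd maxLen allow cs.length 0 _ (by omega)]
  rw [PySem.Dict.counter_eq_foldl]
  rw [pvEmitTokens_eq]
  have h := gMain cs cand bnd (pvPrefixes cand) maxLen allow (pvPrefixes_closed cand)
    cs.length 0 none (by omega) (by omega) (Or.inl rfl)
  simp only [List.drop_zero] at h
  rw [h]
  rfl

-- ----- aggregation -----

theorem aggEq (loc : PySem.Dict String Int)
    (hnd : loc.keys.Nodup) (st : PySem.Dict String Int × PySem.Dict String Int) :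
    loc.keys.foldl (fun st2 tok =>
        (st2.1.modify tok 0 (· + 1),
         if loc.getD tok 0 > st2.2.getD tok 0 then st2.2.insert tok (loc.getD tok 0) else st2.2)) st =
    loc.items.foldl (fun st2 pr =>
        (st2.1.modify pr.1 0 (· + 1),
         if pr.2 > st2.2.getD pr.1 0 then st2.2.insert pr.1 pr.2 else st2.2)) st := by
  rw [PySem.Dict.items_eq_map_keys loc hnd 0, List.foldl_map]

-- ===== VERDICT (by name: the statement is the Claim_ definition above) =====
theorem collect_doc_stats_chunk_py_spec : Claim_equal_collect_doc_stats_chunk_py := by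
  intro args _
  unfold Spec_collect_doc_stats_chunk_py
  obtain ⟨items, candidates, max_len, allow, cap, boundaries⟩ := args
  unfold collect_doc_stats_chunk_py collect_doc_stats_chunk_py_alt
  dsimp only
  rw [PySem.List.foldl_congr_mem items _
    (fun (st : PySem.Dict String Int × PySem.Dict String Int) (item : String) =>
      (PySem.Dict.counter (pvEmitTokens (PySem.List.slice item.toList none (some cap))
          candidates (pvPrefixes candidates) boundaries max_len allow)).items.foldl
        (fun (st2 : PySem.Dict String Int × PySem.Dict String Int) pr =>
          (st2.1.modify pr.1 0 (· + 1),
           if pr.2 > st2.2.getD pr.1 0 then st2.2.insert pr.1 pr.2 else st2.2)) st)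
    (PySem.Dict.empty, PySem.Dict.empty)
    (fun st item _ => by
      dsimp only
      rw [perDoc]
      exact aggEq _ (PySem.Dict.nodup_keys_counter _) st)]
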